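-- pv_equiv track=rewrite | github.com/CarolGonz/daily_coding | string_cases.py | printer_error
-- ===== SOURCE A (Python) =====
-- def printer_error(s):
--     # your code
--
--     wronglet = list(map(chr, range(ord('n'), ord('z')+1)))
--     countwl = 0
--
--     len_s = len(s)
--
--     for i in wronglet:
--         countwl_ = s.count(i)
--         countwl += countwl_
--
--     return str(countwl)+'/'+str(len_s)
-- ===== SOURCE B (Python) =====
-- def printer_error(s):
--     count = sum(1 for c in s if 'n' <= c <= 'z')
--     return str(count) + '/' + str(len(s))
-- ===== Notes on version B (the rewrite author's own statement) =====
-- stated objective: idiomatic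
-- what changed: Replaces A's loop over the 13 target letters with 13 whole-string s.count scans by a single pass over the string counting characters in the inclusive range 'n'..'z'.
import Mathlib
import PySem

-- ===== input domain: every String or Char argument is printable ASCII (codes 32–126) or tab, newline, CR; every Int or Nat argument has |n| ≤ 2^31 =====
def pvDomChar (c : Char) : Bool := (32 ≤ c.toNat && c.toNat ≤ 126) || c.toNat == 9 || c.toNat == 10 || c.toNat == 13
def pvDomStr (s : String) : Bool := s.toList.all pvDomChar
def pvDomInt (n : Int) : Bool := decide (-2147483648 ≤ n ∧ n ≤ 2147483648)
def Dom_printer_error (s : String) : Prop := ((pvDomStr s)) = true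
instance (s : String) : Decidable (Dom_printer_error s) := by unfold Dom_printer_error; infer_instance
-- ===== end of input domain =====

-- B makes one pass over the string instead of A's 13 whole-string s.count scans; return values are identical.

-- ===== PORT A =====
-- wronglet = list(map(chr, range(ord('n'), ord('z')+1)))  — chr ported as Char.ofNat, exact on this ASCII range
def pvWronglet : List Char :=
  (PySem.List.pyRange (('n'.toNat : Int)) (('z'.toNat : Int) + 1)).map (fun i => Char.ofNat i.toNat)

def printer_error (s : String) : String :=
  let wronglet := pvWronglet
  let countwl : Int := 0
  let len_s : Int := PySem.Str.len s
  let countwl := wronglet.foldl (fun countwl i => countwl + (PySem.Str.count s (String.singleton i) : Int)) countwl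
  PySem.Int.toStr countwl ++ "/" ++ PySem.Int.toStr len_s

-- ===== PORT B =====
def printer_error_alt (s : String) : String :=
  let count : Int := s.toList.foldl (fun acc c => if 'n' ≤ c ∧ c ≤ 'z' then acc + 1 else acc) 0
  PySem.Int.toStr count ++ "/" ++ PySem.Int.toStr (PySem.Str.len s)

-- ===== PRECONDITION & SPEC =====
def Spec_printer_error (s : String) (out : String) : Prop := out = printer_error_alt s
instance (s : String) (out : String) : Decidable (Spec_printer_error s out) := by unfold Spec_printer_error; infer_instance

-- ===== CLAIM (what is proved, stated in full; the proofs are below) =====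
def Claim_equal_printer_error : Prop := ∀ (s : String), Dom_printer_error s → Spec_printer_error s (printer_error s)

-- ===== LEMMAS AND PROOFS =====

-- Python s.count with a single-character needle counts occurrences of that character.
theorem count_go_singleton (c : Char) (l : List Char) (fuel : Nat) (acc : Nat)
    (h : l.length ≤ fuel) :
    PySem.Chars.count.go [c] fuel l acc = acc + l.count c := by
  induction l generalizing fuel acc with
  | nil =>
    cases fuel <;> simp [PySem.Chars.count.go]
  | cons x t ih =>
    cases fuel with
    | zero => simp at h
    | succ n =>
      simp only [List.length_cons, Nat.add_le_add_iff_right] at h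
      by_cases hx : x = c
      · subst hx
        simp [PySem.Chars.count.go, List.isPrefixOf, ih _ _ h]
        omega
      · have : ([c].isPrefixOf (x :: t)) = false := by
          simp [List.isPrefixOf]; exact fun h' => hx h'.symm
        simp [PySem.Chars.count.go, this, ih _ _ h, hx]

theorem count_singleton (s : String) (c : Char) :
    PySem.Str.count s (String.singleton c) = s.toList.count c := by
  rw [PySem.Str.count_eq]
  have h1 : (String.singleton c).toList = [c] := by simp
  rw [h1]
  have h2 : s.toList.length = s.length := by simp
  simpa [PySem.Chars.count, h2] using count_go_singleton c s.toList s.length 0 (by simp)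

-- membership counting splits off the head letter when it is not repeated in the tail list
theorem countP_mem_cons (c : Char) (L : List Char) (hc : c ∉ L) (l : List Char) :
    l.countP (fun x => decide (x ∈ c :: L))
      = l.count c + l.countP (fun x => decide (x ∈ L)) := by
  induction l with
  | nil => simp
  | cons y t iht =>
    rw [List.countP_cons, List.count_cons, List.countP_cons, iht]
    by_cases hy : y = c
    · subst hy
      have hyL : y ∉ L := hc
      simp [hyL]
      omega
    · by_cases hyL : y ∈ L <;> simp [hy, hyL] <;> omega

-- summing per-letter counts over a duplicate-free letter list is counting membership
theorem foldl_count_eq_countP (L : List Char) (hL : L.Nodup) (l : List Char) (a : Int) :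
    L.foldl (fun acc c => acc + (l.count c : Int)) a
      = a + (l.countP (fun x => decide (x ∈ L)) : Int) := by
  induction L generalizing a with
  | nil => simp
  | cons c L ih =>
    have hc : c ∉ L := (List.nodup_cons.mp hL).1
    have hLn : L.Nodup := (List.nodup_cons.mp hL).2
    simp only [List.foldl_cons, ih hLn, countP_mem_cons c L hc l]
    push_cast
    ring

theorem mem_wronglet_iff (x : Char) : x ∈ pvWronglet ↔ ('n' ≤ x ∧ x ≤ 'z') := by
  have hlist : pvWronglet = ['n','o','p','q','r','s','t','u','v','w','x','y','z'] := by decide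
  rw [hlist]
  constructor
  · intro h
    fin_cases h <;> exact ⟨by decide, by decide⟩
  · rintro ⟨h1, h2⟩
    have htn : x.toNat = x.val.toNat := rfl
    have hn : 110 ≤ x.toNat := by
      have h := UInt32.le_iff_toNat_le.mp (Char.le_def.mp h1)
      have hlit : ('n'.val.toNat) = 110 := by decide
      omega
    have hz : x.toNat ≤ 122 := by
      have h := UInt32.le_iff_toNat_le.mp (Char.le_def.mp h2)
      have hlit : ('z'.val.toNat) = 122 := by decide
      omega
    have hval : x = Char.ofNat x.toNat := by
      exact (Char.ofNat_toNat x).symm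
    interval_cases h : x.toNat <;> rw [hval] <;> decide

-- ===== VERDICT (by name: the statement is the Claim_ definition above) =====
theorem printer_error_spec : Claim_equal_printer_error := by
  intro s _
  unfold Spec_printer_error printer_error printer_error_alt
  simp only [count_singleton]
  have hnodup : pvWronglet.Nodup := by decide
  rw [foldl_count_eq_countP pvWronglet hnodup s.toList 0]
  have hcountP : s.toList.countP (fun x => decide (x ∈ pvWronglet))
      = s.toList.countP (fun c => decide ('n' ≤ c ∧ c ≤ 'z')) := by
    apply List.countP_congr
    intro x _
    simp [mem_wronglet_iff]
  rw [hcountP]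
  rw [PySem.List.foldl_ite_add_one]
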